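-- pv_equiv track=rewrite | github.com/piao7372-hue/project2 | src/datasets/builders/stage1_preprocess.py | decode_nus_tag_line
-- ===== SOURCE A (Python) =====
-- def decode_nus_tag_line(line: str, vocab: list[str], vocab_index: dict[str, int]) -> tuple[list[str], dict[str, int]]:
--     parts = line.split()
--     raw_tokens = parts[1:] if parts else []
--     active_indices = set()
--     known_token_count = 0
--     for token in raw_tokens:
--         index = vocab_index.get(token)
--         if index is not None:
--             active_indices.add(index)
--             known_token_count += 1
--     tags = [vocab[index] for index in sorted(active_indices)]
--     return tags, {
--         "raw_all_tags_token_count": len(raw_tokens),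
--         "raw_known_vocab_token_count": known_token_count,
--         "raw_out_of_vocab_token_count": len(raw_tokens) - known_token_count,
--         "raw_duplicate_vocab_token_count": known_token_count - len(active_indices),
--     }
-- ===== SOURCE B (Python) =====
-- def decode_nus_tag_line(line: str, vocab: list[str], vocab_index: dict[str, int]) -> tuple[list[str], dict[str, int]]:
--     raw_tokens = line.split()[1:]
--     known = [vocab_index[t] for t in raw_tokens if t in vocab_index]
--     active_indices = set(known)
--     tags = [word for i, word in enumerate(vocab) if i in active_indices]
--     return tags, {
--         "raw_all_tags_token_count": len(raw_tokens),
--         "raw_known_vocab_token_count": len(known),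
--         "raw_out_of_vocab_token_count": len(raw_tokens) - len(known),
--         "raw_duplicate_vocab_token_count": len(known) - len(active_indices),
--     }
-- ===== Notes on version B (the rewrite author's own statement) =====
-- stated objective: idiomatic
-- what changed: The accumulate-into-a-set for-loop with a running counter plus sorted(set) and an index-comprehension is replaced by a known-index list comprehension, set() of it, and a single in-order enumerate scan of the vocabulary that emits each word whose index is active.
-- intended difference: On lines where some tag token maps through vocab_index to a negative in-range index, A's vocab[index] wraps around and returns a tag from the end of the vocabulary, while B returns only tags at valid indices; B's is the intended decoding since the wraparound is an artefact of Python's negative indexing. — e.g. on decode_nus_tag_line("h a", ["w"], [("a", -1)]): A returns (["w"], [("raw_all_tags_token_count", 1), ("raw_known_vocab_token_count", 1), ("raw_out_of_vocab_token_count", 0), ("ra…, B returns ([], [("raw_all_tags_token_count", 1), ("raw_known_vocab_token_count", 1), ("raw_out_of_vocab_token_count", 0), ("raw_d…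
import Mathlib
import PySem

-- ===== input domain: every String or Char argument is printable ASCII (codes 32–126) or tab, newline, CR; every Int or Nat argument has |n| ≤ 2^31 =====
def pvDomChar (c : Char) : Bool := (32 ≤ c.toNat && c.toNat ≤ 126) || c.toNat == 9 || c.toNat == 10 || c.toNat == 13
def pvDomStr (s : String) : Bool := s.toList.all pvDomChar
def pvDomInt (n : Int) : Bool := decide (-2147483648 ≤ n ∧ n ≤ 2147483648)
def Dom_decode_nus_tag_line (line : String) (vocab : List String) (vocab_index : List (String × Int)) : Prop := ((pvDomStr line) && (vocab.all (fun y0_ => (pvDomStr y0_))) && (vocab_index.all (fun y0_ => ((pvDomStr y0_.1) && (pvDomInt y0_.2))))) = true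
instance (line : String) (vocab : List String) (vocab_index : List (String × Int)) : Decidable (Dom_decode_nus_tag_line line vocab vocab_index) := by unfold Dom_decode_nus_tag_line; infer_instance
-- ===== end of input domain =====

-- B replaces A's accumulate-into-a-set loop plus sort-of-the-set by a known-index
-- comprehension, set() of it, and a single in-order scan of the vocabulary (idiomatic; same cost).

-- ===== PORT A =====
def decode_nus_tag_line (line : String) (vocab : List String) (vocab_index : List (String × Int)) : List String × (List (String × Int)) :=
  let parts := PySem.Str.split₀ line
  let raw_tokens := if parts.isEmpty then [] else PySem.List.slice parts (some 1) none
  let st := raw_tokens.foldl (fun (st : PySem.Set Int × Int) token =>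
      match PySem.Dict.get? (PySem.Dict.mk vocab_index) token with
      | some index => (st.1.add index, st.2 + 1)
      | none => st) (PySem.Set.empty, 0)
  let active_indices := st.1
  let known_token_count : Int := st.2
  -- `vocab[index]` raises IndexError for index outside [-len(vocab), len(vocab)); Pre_ excludes
  -- exactly those inputs, so the `""` default of pyGetD is never taken inside Pre_.
  let tags := (PySem.List.sorted active_indices (fun x => x)).map (fun index => PySem.List.pyGetD vocab index "")
  (tags, [("raw_all_tags_token_count", (raw_tokens.length : Int)),
          ("raw_known_vocab_token_count", known_token_count),
          ("raw_out_of_vocab_token_count", (raw_tokens.length : Int) - known_token_count),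
          ("raw_duplicate_vocab_token_count", known_token_count - PySem.Set.len active_indices)])

-- ===== PORT B =====
def decode_nus_tag_line_alt (line : String) (vocab : List String) (vocab_index : List (String × Int)) : List String × (List (String × Int)) :=
  let raw_tokens := PySem.List.slice (PySem.Str.split₀ line) (some 1) none
  -- `[vocab_index[t] for t in raw_tokens if t in vocab_index]`: exact as filterMap of the
  -- first-match lookup, since `t in d` holds iff `d.get? t` is `some` and `d[t]` is that value.
  let known := raw_tokens.filterMap (fun t => PySem.Dict.get? (PySem.Dict.mk vocab_index) t)
  let active_indices := PySem.Set.ofList known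
  let tags := (PySem.List.enumerate vocab).filterMap
      (fun p => if PySem.Set.contains active_indices p.1 then some p.2 else none)
  (tags, [("raw_all_tags_token_count", (raw_tokens.length : Int)),
          ("raw_known_vocab_token_count", (known.length : Int)),
          ("raw_out_of_vocab_token_count", (raw_tokens.length : Int) - (known.length : Int)),
          ("raw_duplicate_vocab_token_count", (known.length : Int) - PySem.Set.len active_indices)])

-- ===== PRECONDITION & SPEC =====
-- Pre_ excludes exactly the inputs on which A raises IndexError: some tag token of the line
-- maps through vocab_index to an index outside [-len(vocab), len(vocab)).
def Pre_decode_nus_tag_line (line : String) (vocab : List String) (vocab_index : List (String × Int)) : Prop :=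
  ∀ t ∈ (PySem.Str.split₀ line).tail,
    ((PySem.Dict.get? (PySem.Dict.mk vocab_index) t).all
      (fun i => decide (-(vocab.length : Int) ≤ i ∧ i < (vocab.length : Int)))) = true
instance (line : String) (vocab : List String) (vocab_index : List (String × Int)) : Decidable (Pre_decode_nus_tag_line line vocab vocab_index) := by unfold Pre_decode_nus_tag_line; infer_instance

def pvWitness_decode_nus_tag_line : String × List String × (List (String × Int)) :=
  ("head a b a", ["x", "y"], [("a", 0), ("b", 1)])

-- On lines where some tag token maps through vocab_index to a negative (in-range) index, A's
-- vocab[index] silently wraps around and returns a tag from the END of the vocabulary, while B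
-- returns only the tags of valid vocabulary indices; B's is the intended decoding (the
-- wraparound is an artefact of Python's negative indexing, not a meaningful tag index).
def D_decode_nus_tag_line (line : String) (vocab : List String) (vocab_index : List (String × Int)) : Prop :=
  ∃ t ∈ (PySem.Str.split₀ line).tail,
    ((PySem.Dict.get? (PySem.Dict.mk vocab_index) t).any (fun i => decide (i < 0))) = true
instance (line : String) (vocab : List String) (vocab_index : List (String × Int)) : Decidable (D_decode_nus_tag_line line vocab vocab_index) := by unfold D_decode_nus_tag_line; infer_instance

def Spec_decode_nus_tag_line (line : String) (vocab : List String) (vocab_index : List (String × Int)) (out : List String × (List (String × Int))) : Prop := ¬ D_decode_nus_tag_line line vocab vocab_index → out = decode_nus_tag_line_alt line vocab vocab_index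
instance (line : String) (vocab : List String) (vocab_index : List (String × Int)) (out : List String × (List (String × Int))) : Decidable (Spec_decode_nus_tag_line line vocab vocab_index out) := by unfold Spec_decode_nus_tag_line; infer_instance

def pvDiffWitness_decode_nus_tag_line : String × List String × (List (String × Int)) :=
  ("h a", ["w"], [("a", -1)])
def pvDiffWitnessOut_decode_nus_tag_line : (List String × (List (String × Int))) × (List String × (List (String × Int))) :=
  ((["w"], [("raw_all_tags_token_count", 1), ("raw_known_vocab_token_count", 1),
            ("raw_out_of_vocab_token_count", 0), ("raw_duplicate_vocab_token_count", 0)]),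
   ([], [("raw_all_tags_token_count", 1), ("raw_known_vocab_token_count", 1),
            ("raw_out_of_vocab_token_count", 0), ("raw_duplicate_vocab_token_count", 0)]))

-- ===== CLAIM (what is proved, stated in full; the proofs are below) =====
def Claim_unchanged_decode_nus_tag_line : Prop := ∀ (line : String) (vocab : List String) (vocab_index : List (String × Int)), Dom_decode_nus_tag_line line vocab vocab_index → Pre_decode_nus_tag_line line vocab vocab_index → Spec_decode_nus_tag_line line vocab vocab_index (decode_nus_tag_line line vocab vocab_index)
def Claim_changed_decode_nus_tag_line : Prop := Dom_decode_nus_tag_line (pvDiffWitness_decode_nus_tag_line.1) (pvDiffWitness_decode_nus_tag_line.2.1) (pvDiffWitness_decode_nus_tag_line.2.2) ∧ Pre_decode_nus_tag_line (pvDiffWitness_decode_nus_tag_line.1) (pvDiffWitness_decode_nus_tag_line.2.1) (pvDiffWitness_decode_nus_tag_line.2.2) ∧ D_decode_nus_tag_line (pvDiffWitness_decode_nus_tag_line.1) (pvDiffWitness_decode_nus_tag_line.2.1) (pvDiffWitness_decode_nus_tag_line.2.2) ∧ decode_nus_tag_line (pvDiffWitness_decode_nus_tag_line.1) (pvDiffWitness_decode_nus_tag_line.2.1)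 (pvDiffWitness_decode_nus_tag_line.2.2) = pvDiffWitnessOut_decode_nus_tag_line.1 ∧ decode_nus_tag_line_alt (pvDiffWitness_decode_nus_tag_line.1) (pvDiffWitness_decode_nus_tag_line.2.1) (pvDiffWitness_decode_nus_tag_line.2.2) = pvDiffWitnessOut_decode_nus_tag_line.2 ∧ pvDiffWitnessOut_decode_nus_tag_line.1 ≠ pvDiffWitnessOut_decode_nus_tag_line.2
def Claim_exact_decode_nus_tag_line : Prop := ∀ (line : String) (vocab : List String) (vocab_index : List (String × Int)), Dom_decode_nus_tag_line line vocab vocab_index → Pre_decode_nus_tag_line line vocab vocab_index → D_decode_nus_tag_line line vocab vocab_index → decode_nus_tag_line line vocab vocab_index ≠ decode_nus_tag_line_alt line vocab vocab_index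

-- ===== LEMMAS AND PROOFS =====

-- A's accumulation loop, characterised: it extends the set by the known indices and counts them.
lemma pvLoopA_eq (d : PySem.Dict String Int) (tokens : List String) (s : PySem.Set Int) (k : Int) :
    tokens.foldl (fun (st : PySem.Set Int × Int) token =>
      match PySem.Dict.get? d token with
      | some index => (st.1.add index, st.2 + 1)
      | none => st) (s, k)
    = (PySem.Set.update s (tokens.filterMap (fun t => PySem.Dict.get? d t)),
       k + ((tokens.filterMap (fun t => PySem.Dict.get? d t)).length : Int)) := by
  induction tokens generalizing s k with
  | nil => simp [PySem.Set.update]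
  | cons t ts ih =>
    cases h : PySem.Dict.get? d t with
    | none => simp [List.foldl_cons, h, ih, PySem.Set.update]
    | some i =>
      simp only [List.foldl_cons, h, List.filterMap_cons, ih]
      simp [PySem.Set.update]
      omega

-- `[w for (i,w) in filter if c i]` as a filter-then-map.
lemma pvFilterMap_if {α β : Type} (c : α → Bool) (g : α → β) (l : List α) :
    l.filterMap (fun p => if c p then some (g p) else none) = (l.filter c).map g := by
  induction l with
  | nil => rfl
  | cons x xs ih => by_cases h : c x <;> simp [List.filterMap_cons, h, ih]

-- The heart: for a set S of indices all inside [0, len vocab), mapping vocab over sorted(S)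
-- equals the in-order scan of the vocabulary keeping positions in S.
lemma pvTags_eq (vocab : List String) (S : PySem.Set Int)
    (hnd : S.Nodup) (hb : ∀ i ∈ S, 0 ≤ i ∧ i < (vocab.length : Int)) :
    (PySem.List.sorted S (fun x => x)).map (fun index => PySem.List.pyGetD vocab index "")
    = (PySem.List.enumerate vocab).filterMap
        (fun p => if PySem.Set.contains S p.1 then some p.2 else none) := by
  rw [pvFilterMap_if]
  set L := (PySem.List.enumerate vocab).filter (fun p => PySem.Set.contains S p.1) with hL
  have hLsub : ∀ p ∈ L, p ∈ PySem.List.enumerate vocab ∧ p.1 ∈ S := by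
    intro p hp
    rw [hL, List.mem_filter] at hp
    exact ⟨hp.1, (PySem.Set.contains_iff S p.1).mp hp.2⟩
  have hpw : L.Pairwise (fun p q => p.1 < q.1) :=
    List.Pairwise.filter _ (PySem.List.pairwise_lt_enumerate vocab 0)
  have hsorted : PySem.List.sorted S (fun x => x) = L.map (fun p => p.1) := by
    apply PySem.List.sorted_eq_of_perm_of_pairwise_lt
    · have hmap : (L.map (fun p => p.1)).Pairwise (· < ·) := List.pairwise_map.mpr hpw
      rw [List.perm_ext_iff_of_nodup (hmap.imp (fun h => ne_of_lt h)) hnd]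
      intro j
      constructor
      · intro hj
        obtain ⟨p, hp, rfl⟩ := List.mem_map.mp hj
        exact (hLsub p hp).2
      · intro hj
        obtain ⟨lo, hi⟩ := hb j hj
        refine List.mem_map.mpr ⟨(j, PySem.List.pyGetD vocab j ""), ?_, rfl⟩
        rw [hL, List.mem_filter]
        refine ⟨?_, (PySem.Set.contains_iff S j).mpr hj⟩
        rw [PySem.List.mem_enumerate_iff]
        refine ⟨j.toNat, by omega, ?_⟩
        have hjn : ((j.toNat : Int)) = j := Int.toNat_of_nonneg lo
        have hjl : j.toNat < vocab.length := by omega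
        have hv : PySem.List.pyGetD vocab j "" = vocab[j.toNat] := by
          conv_lhs => rw [← hjn]
          rw [PySem.List.pyGetD_natCast]
          exact List.getD_eq_getElem vocab "" hjl
        simp [hjn, hv]
    · exact List.pairwise_map.mpr hpw
  rw [hsorted, List.map_map]
  apply List.map_congr_left
  intro p hp
  obtain ⟨hpe, _⟩ := hLsub p hp
  rw [PySem.List.mem_enumerate_iff] at hpe
  obtain ⟨k, hk, rfl⟩ := hpe
  simp [PySem.List.pyGetD_natCast, List.getD_eq_getElem, hk]

-- Both loops produce the same known-index list; shared facts for the three theorems.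
lemma pvKnown_bounds (line : String) (vocab : List String) (vocab_index : List (String × Int))
    (hpre : Pre_decode_nus_tag_line line vocab vocab_index)
    (hnD : ¬ D_decode_nus_tag_line line vocab vocab_index) :
    ∀ i ∈ PySem.Set.ofList ((PySem.Str.split₀ line).tail.filterMap
        (fun t => PySem.Dict.get? (PySem.Dict.mk vocab_index) t)),
      0 ≤ i ∧ i < (vocab.length : Int) := by
  unfold Pre_decode_nus_tag_line at hpre
  unfold D_decode_nus_tag_line at hnD
  intro i hi
  rw [PySem.Set.mem_ofList] at hi
  obtain ⟨t, ht, hgt⟩ := List.mem_filterMap.mp hi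
  have h1 := hpre t ht
  rw [hgt] at h1
  simp only [Option.all_some, decide_eq_true_eq] at h1
  have h2 : ¬ (i < 0) := fun hlt => hnD ⟨t, ht, by simp [hgt, hlt]⟩
  omega

lemma pvRaw_eq (parts : List String) :
    (if parts.isEmpty then [] else parts.tail) = parts.tail := by
  cases parts <;> rfl

lemma pvUpdate_empty (known : List Int) :
    PySem.Set.update PySem.Set.empty known = PySem.Set.ofList known := by
  rw [PySem.Set.ofList_eq_foldl]; rfl

theorem decode_nus_tag_line_spec : Claim_unchanged_decode_nus_tag_line := by
  intro line vocab vocab_index _ hpre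
  unfold Spec_decode_nus_tag_line
  intro hnD
  have hb := pvKnown_bounds line vocab vocab_index hpre hnD
  unfold decode_nus_tag_line decode_nus_tag_line_alt
  simp only [PySem.List.slice_from_one, pvRaw_eq, pvLoopA_eq, pvUpdate_empty]
  refine Prod.ext ?_ ?_
  · exact pvTags_eq vocab _ (PySem.Set.nodup_ofList _) hb
  · simp

theorem decode_nus_tag_line_changed : Claim_changed_decode_nus_tag_line := by
  unfold Claim_changed_decode_nus_tag_line; decide

theorem decode_nus_tag_line_tight : Claim_exact_decode_nus_tag_line := by
  intro line vocab vocab_index _ hpre hD heq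
  obtain ⟨t, ht, hany⟩ := hD
  cases hgt : PySem.Dict.get? (PySem.Dict.mk vocab_index) t with
  | none => rw [hgt] at hany; simp at hany
  | some i =>
  rw [hgt] at hany
  simp only [Option.any_some, decide_eq_true_eq] at hany
  -- i is a negative member of the active set; A's tag list keeps it, B's scan cannot.
  have htags := congrArg (fun r => r.1.length) heq
  unfold decode_nus_tag_line decode_nus_tag_line_alt at htags
  simp only [PySem.List.slice_from_one, pvRaw_eq, pvLoopA_eq, pvUpdate_empty] at htags
  set known := (PySem.Str.split₀ line).tail.filterMap
      (fun t => PySem.Dict.get? (PySem.Dict.mk vocab_index) t) with hknown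
  set S := PySem.Set.ofList known with hS
  have hiS : i ∈ S := by
    rw [hS, PySem.Set.mem_ofList, hknown]
    exact List.mem_filterMap.mpr ⟨t, ht, hgt⟩
  have hA : ((PySem.List.sorted S (fun x => x)).map
      (fun index => PySem.List.pyGetD vocab index "")).length = S.length := by
    rw [List.length_map, PySem.List.length_sorted]
  have hBform := pvFilterMap_if (fun p : Int × String => PySem.Set.contains S p.1) (fun p => p.2)
      (PySem.List.enumerate vocab)
  set M := ((PySem.List.enumerate vocab).filter
      (fun p => PySem.Set.contains S p.1)).map (fun p => p.1) with hM
  have hMnodup : M.Nodup :=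
    (List.pairwise_map.mpr (List.Pairwise.filter _ (PySem.List.pairwise_lt_enumerate vocab 0))).imp
      (fun h => ne_of_lt h)
  have hMsub : M ⊆ S.erase i := by
    intro j hj
    rw [hM] at hj
    obtain ⟨p, hp, rfl⟩ := List.mem_map.mp hj
    rw [List.mem_filter] at hp
    have hpe := hp.1
    rw [PySem.List.mem_enumerate_iff] at hpe
    obtain ⟨k, hk, rfl⟩ := hpe
    have hmem : ((0:Int) + (k:Int)) ∈ S := (PySem.Set.contains_iff S _).mp hp.2
    have hne : ((0:Int) + (k:Int)) ≠ i := by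
      intro h; omega
    exact (List.mem_erase_of_ne hne).mpr hmem
  have hMle : M.length ≤ (S.erase i).length := (List.subperm_of_subset hMnodup hMsub).length_le
  have hSe : (S.erase i).length = S.length - 1 := List.length_erase_of_mem hiS
  have hS1 : 1 ≤ S.length := List.length_pos_of_mem hiS
  have hBlen : (((PySem.List.enumerate vocab).filterMap
      (fun p => if PySem.Set.contains S p.1 then some p.2 else none)).length) = M.length := by
    rw [hBform, hM, List.length_map, List.length_map]
  simp only [hA, hBlen] at htags
  omega
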